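-- pv_equiv track=rewrite | github.com/AddictedToBattlestar/aoc-python | trebuchetCalibrator.py | get_value_from_left
-- ===== SOURCE A (Python) =====
-- numbers = {
--     "one": 1,
--     "two": 2,
--     "three": 3,
--     "four": 4,
--     "five": 5,
--     "six": 6,
--     "seven": 7,
--     "eight": 8,
--     "nine": 9
-- }
--
-- def get_value_from_left(character_value, buffer):
--     if character_value.isdigit():
--         return int(character_value)
--     new_buffer = character_value + buffer
--     for number_string, value in numbers.items():
--         if number_string == new_buffer[:len(number_string)]:
--             return value
--     return None
-- ===== SOURCE B (Python) =====
-- def _spelled(s):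
--     # hard-coded decision tree: dispatch on the first character, then check the tail
--     if not s:
--         return None
--     c = s[0]
--     if c == 'o':
--         return 1 if s[1:3] == "ne" else None
--     if c == 't':
--         if s[1:3] == "wo":
--             return 2
--         if s[1:5] == "hree":
--             return 3
--         return None
--     if c == 'f':
--         if s[1:4] == "our":
--             return 4
--         if s[1:4] == "ive":
--             return 5
--         return None
--     if c == 's':
--         if s[1:3] == "ix":
--             return 6
--         if s[1:5] == "even":
--             return 7
--         return None
--     if c == 'e':
--         return 8 if s[1:5] == "ight" else None
--     if c == 'n':
--         return 9 if s[1:4] == "ine" else None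
--     return None
--
-- def get_value_from_left(character_value, buffer):
--     if character_value.isdigit():
--         return int(character_value)
--     return _spelled(character_value + buffer)
-- ===== Notes on version B (the rewrite author's own statement) =====
-- stated objective: alternative
-- what changed: Instead of scanning all nine dict entries and comparing each word against a prefix of the buffer, B walks a hard-coded decision tree: it dispatches on the first character of the buffer and then compares only the matching word tails, which is valid because the number words are prefix-free and distinguished by their first letter groups.
import Mathlib
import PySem

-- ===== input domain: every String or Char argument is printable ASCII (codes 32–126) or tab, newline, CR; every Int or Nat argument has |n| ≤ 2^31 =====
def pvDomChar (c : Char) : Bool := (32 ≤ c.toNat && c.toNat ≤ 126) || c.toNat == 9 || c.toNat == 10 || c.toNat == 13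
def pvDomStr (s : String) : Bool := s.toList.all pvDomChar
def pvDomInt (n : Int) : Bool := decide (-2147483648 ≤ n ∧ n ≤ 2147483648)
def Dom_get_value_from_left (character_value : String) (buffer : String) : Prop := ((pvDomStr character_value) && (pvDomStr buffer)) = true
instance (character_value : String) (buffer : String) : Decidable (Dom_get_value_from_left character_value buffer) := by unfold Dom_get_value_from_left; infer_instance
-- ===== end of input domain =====

-- B replaces A's scan over all nine dict entries by a hard-coded trie walk: a
-- decision tree branching on the first characters of the buffer (objective:
-- alternative; equivalent because the number words are prefix-free).


-- ===== PORT A =====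
-- the module-level dict `numbers`, in insertion order
def pvNumbersA : List (List Char × Int) :=
  [(['o','n','e'], 1), (['t','w','o'], 2), (['t','h','r','e','e'], 3),
   (['f','o','u','r'], 4), (['f','i','v','e'], 5), (['s','i','x'], 6),
   (['s','e','v','e','n'], 7), (['e','i','g','h','t'], 8), (['n','i','n','e'], 9)]

-- `for number_string, value in numbers.items(): if number_string == new_buffer[:len(number_string)] : return value`
-- (new_buffer[:n] with n ≥ 0 is exactly List.take n on the char list)
def pvScanA (nb : List Char) : List (List Char × Int) → Option Int
  | [] => none
  | (w, v) :: rest => if w = nb.take w.length then some v else pvScanA nb rest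

def get_value_from_left (character_value : String) (buffer : String) : Option Int :=
  if PySem.Str.strIsdigit character_value then PySem.Int.ofStr? character_value
  else pvScanA (character_value.toList ++ buffer.toList) pvNumbersA

-- ===== PORT B =====
-- Source B's `_spelled`: a decision tree dispatching on the first character, then
-- comparing the rest-slice; a Python slice s[a:b] (0 <= a <= b) on the char list
-- is exactly (drop a).take (b-a), here drop 1 is the pattern's tail `rest`
def pvSpelled : List Char → Option Int
  | [] => none
  | c :: rest =>
    if c = 'o' then (if rest.take 2 = ['n','e'] then some 1 else none)
    else if c = 't' then
      if rest.take 2 = ['w','o'] then some 2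
      else if rest.take 4 = ['h','r','e','e'] then some 3
      else none
    else if c = 'f' then
      if rest.take 3 = ['o','u','r'] then some 4
      else if rest.take 3 = ['i','v','e'] then some 5
      else none
    else if c = 's' then
      if rest.take 2 = ['i','x'] then some 6
      else if rest.take 4 = ['e','v','e','n'] then some 7
      else none
    else if c = 'e' then (if rest.take 4 = ['i','g','h','t'] then some 8 else none)
    else if c = 'n' then (if rest.take 3 = ['i','n','e'] then some 9 else none)
    else none

def get_value_from_left_alt (character_value : String) (buffer : String) : Option Int :=
  if PySem.Str.strIsdigit character_value then PySem.Int.ofStr? character_value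
  else pvSpelled (character_value.toList ++ buffer.toList)

-- ===== PRECONDITION & SPEC =====
def Spec_get_value_from_left (character_value : String) (buffer : String) (out : Option Int) : Prop := out = get_value_from_left_alt character_value buffer
instance (character_value : String) (buffer : String) (out : Option Int) : Decidable (Spec_get_value_from_left character_value buffer out) := by unfold Spec_get_value_from_left; infer_instance

-- ===== CLAIM =====
def Claim_equal_get_value_from_left : Prop := ∀ (character_value : String) (buffer : String), Dom_get_value_from_left character_value buffer → Spec_get_value_from_left character_value buffer (get_value_from_left character_value buffer)

-- ===== LEMMAS AND PROOFS =====
theorem pv_main (nb : List Char) : pvScanA nb pvNumbersA = pvSpelled nb := by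
  cases nb with
  | nil => decide
  | cons c1 rest =>
    by_cases h1 : c1 = 'o'
    · subst h1
      simp only [pvScanA, pvNumbersA, pvSpelled, List.take_succ_cons, List.cons.injEq,
        List.length_cons, List.length_nil]
      simp [eq_comm]
    · by_cases h2 : c1 = 't'
      · subst h2
        simp only [pvScanA, pvNumbersA, pvSpelled, List.take_succ_cons, List.cons.injEq,
          List.length_cons, List.length_nil]
        simp [eq_comm]
      · by_cases h3 : c1 = 'f'
        · subst h3
          simp only [pvScanA, pvNumbersA, pvSpelled, List.take_succ_cons, List.cons.injEq,
            List.length_cons, List.length_nil]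
          simp [eq_comm]
        · by_cases h4 : c1 = 's'
          · subst h4
            simp only [pvScanA, pvNumbersA, pvSpelled, List.take_succ_cons, List.cons.injEq,
              List.length_cons, List.length_nil]
            simp [eq_comm]
          · by_cases h5 : c1 = 'e'
            · subst h5
              simp only [pvScanA, pvNumbersA, pvSpelled, List.take_succ_cons, List.cons.injEq,
                List.length_cons, List.length_nil]
              simp [eq_comm]
            · by_cases h6 : c1 = 'n'
              · subst h6
                simp only [pvScanA, pvNumbersA, pvSpelled, List.take_succ_cons, List.cons.injEq,
                  List.length_cons, List.length_nil]
                simp [eq_comm]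
              · simp [pvScanA, pvNumbersA, pvSpelled, List.take_succ_cons,
                  Ne.symm h1, Ne.symm h2, Ne.symm h3, Ne.symm h4, Ne.symm h5, Ne.symm h6,
                  h1, h2, h3, h4, h5, h6]

-- ===== VERDICT =====
theorem get_value_from_left_spec : Claim_equal_get_value_from_left := by
  intro character_value buffer _
  unfold Spec_get_value_from_left get_value_from_left get_value_from_left_alt
  rw [pv_main]
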